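-- pv_equiv track=rewrite | github.com/brunoalbin23/PYTHON | Nivel1/NivelUno/Main.py | remplazo_vocales_contador
-- ===== SOURCE A (Python) =====
-- def remplazo_vocales_contador(cadena):
--     nueva_cadena = ""
--     contador = 1;
--     for i in cadena:
--         if i == "a" or i == "e" or i == "i" or i == "o" or i == "u":
--             nueva_cadena += str(contador)
--             contador += 1
--         else:
--             nueva_cadena += i
--     return nueva_cadena
-- ===== SOURCE B (Python) =====
-- def remplazo_vocales_contador(cadena):
--     counts = []
--     n = 0
--     for c in cadena:
--         n += c in "aeiou"
--         counts.append(n)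
--     return "".join(str(k) if c in "aeiou" else c for c, k in zip(cadena, counts))
-- ===== Notes on version B (the rewrite author's own statement) =====
-- stated objective: alternative
-- what changed: Replaces A's single stateful loop (string accumulator + explicit counter) with a two-phase scheme: first a running-count pass pairing every character with the number of vowels up to it, then a zip/join comprehension that renders each character from that count, with no mutable counter in the rendering step.
import Mathlib
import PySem

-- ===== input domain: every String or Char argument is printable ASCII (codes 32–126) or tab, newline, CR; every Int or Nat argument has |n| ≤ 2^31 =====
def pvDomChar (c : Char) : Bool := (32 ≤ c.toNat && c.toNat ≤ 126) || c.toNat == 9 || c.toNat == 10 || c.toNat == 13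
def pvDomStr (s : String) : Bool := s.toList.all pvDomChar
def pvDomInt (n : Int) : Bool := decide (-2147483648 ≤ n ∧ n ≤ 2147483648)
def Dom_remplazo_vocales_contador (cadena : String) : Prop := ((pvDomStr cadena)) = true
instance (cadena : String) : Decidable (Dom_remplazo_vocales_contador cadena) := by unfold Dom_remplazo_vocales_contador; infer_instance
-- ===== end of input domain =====

-- B replaces A's single stateful loop with a running-vowel-count pass plus a zip/join rendering pass (alternative decomposition, same result).


-- ===== PORT A =====
-- literal port: state = (nueva_cadena as List Char, contador : Int); append per character
def remplazo_vocales_contador (cadena : String) : String :=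
  let st := cadena.toList.foldl (fun (st : List Char × Int) i =>
    if i = 'a' ∨ i = 'e' ∨ i = 'i' ∨ i = 'o' ∨ i = 'u' then
      (st.1 ++ (PySem.Int.toStr st.2).toList, st.2 + 1)
    else
      (st.1 ++ [i], st.2)) ([], 1)
  String.mk st.1

-- ===== PORT B =====
-- first pass: running count of vowels seen so far, one entry per character
def altCounts (cadena : String) : List Int :=
  (cadena.toList.foldl (fun (st : List Int × Int) c =>
    let n := st.2 + (if c ∈ ['a','e','i','o','u'] then 1 else 0)
    (st.1 ++ [n], n)) ([], 0)).1

-- second pass: zip + join comprehension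
def remplazo_vocales_contador_alt (cadena : String) : String :=
  String.mk ((cadena.toList.zip (altCounts cadena)).flatMap
    (fun p => if p.1 ∈ ['a','e','i','o','u'] then (PySem.Int.toStr p.2).toList else [p.1]))

-- ===== PRECONDITION & SPEC =====
def Spec_remplazo_vocales_contador (cadena : String) (out : String) : Prop := out = remplazo_vocales_contador_alt cadena
instance (cadena : String) (out : String) : Decidable (Spec_remplazo_vocales_contador cadena out) := by unfold Spec_remplazo_vocales_contador; infer_instance

-- ===== CLAIM (what is proved, stated in full; the proofs are below) =====
def Claim_equal_remplazo_vocales_contador : Prop := ∀ (cadena : String), Dom_remplazo_vocales_contador cadena → Spec_remplazo_vocales_contador cadena (remplazo_vocales_contador cadena)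

-- ===== LEMMAS AND PROOFS =====

-- common rendering of a suffix, given the number of vowels already seen
def pvRender (l : List Char) (n : Int) : List Char :=
  match l with
  | [] => []
  | c :: t =>
    if c ∈ ['a','e','i','o','u'] then (PySem.Int.toStr (n + 1)).toList ++ pvRender t (n + 1)
    else c :: pvRender t n

-- the running-count list of B, directly
def pvCounts (l : List Char) (n : Int) : List Int :=
  match l with
  | [] => []
  | c :: t =>
    let m := n + (if c ∈ ['a','e','i','o','u'] then 1 else 0)
    m :: pvCounts t m

theorem pvFoldA (l : List Char) (acc : List Char) (n : Int) :
    (l.foldl (fun (st : List Char × Int) i =>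
      if i = 'a' ∨ i = 'e' ∨ i = 'i' ∨ i = 'o' ∨ i = 'u' then
        (st.1 ++ (PySem.Int.toStr st.2).toList, st.2 + 1)
      else
        (st.1 ++ [i], st.2)) (acc, n + 1)).1 = acc ++ pvRender l n := by
  induction l generalizing acc n with
  | nil => simp [pvRender]
  | cons c t ih =>
    by_cases h : c ∈ ['a','e','i','o','u']
    · have h' : c = 'a' ∨ c = 'e' ∨ c = 'i' ∨ c = 'o' ∨ c = 'u' := by
        simpa using h
      simp only [List.foldl_cons, if_pos h']
      rw [ih (acc ++ (PySem.Int.toStr (n + 1)).toList) (n + 1)]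
      simp [pvRender, h]
    · have h' : ¬(c = 'a' ∨ c = 'e' ∨ c = 'i' ∨ c = 'o' ∨ c = 'u') := by
        simpa using h
      simp only [List.foldl_cons, if_neg h']
      rw [ih (acc ++ [c]) n]
      simp [pvRender, h]

theorem pvFoldB (l : List Char) (acc : List Int) (n : Int) :
    (l.foldl (fun (st : List Int × Int) c =>
      let m := st.2 + (if c ∈ ['a','e','i','o','u'] then 1 else 0)
      (st.1 ++ [m], m)) (acc, n)).1 = acc ++ pvCounts l n := by
  induction l generalizing acc n with
  | nil => simp [pvCounts]
  | cons c t ih =>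
    simp only [List.foldl_cons]
    rw [ih]
    simp [pvCounts]

theorem pvZipRender (l : List Char) (n : Int) :
    (l.zip (pvCounts l n)).flatMap
      (fun p => if p.1 ∈ ['a','e','i','o','u'] then (PySem.Int.toStr p.2).toList else [p.1])
      = pvRender l n := by
  induction l generalizing n with
  | nil => simp [pvCounts, pvRender]
  | cons c t ih =>
    simp only [pvCounts, List.zip_cons_cons, List.flatMap_cons]
    rw [ih]
    by_cases h : c ∈ ['a','e','i','o','u']
    · simp [pvRender, h]
    · simp [pvRender, h]

-- ===== VERDICT (by name: the statement is the Claim_ definition above) =====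
theorem remplazo_vocales_contador_spec : Claim_equal_remplazo_vocales_contador := by
  intro cadena _
  unfold Spec_remplazo_vocales_contador remplazo_vocales_contador remplazo_vocales_contador_alt altCounts
  rw [pvFoldB _ [] 0]
  simp only [List.nil_append]
  rw [pvZipRender]
  have := pvFoldA cadena.toList [] 0
  simp only [List.nil_append] at this
  norm_num at this ⊢
  rw [this]
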